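-- pv_equiv track=rewrite | github.com/wonjaeban/algorithm | 프로그래머스/lv1/42862. 체육복/체육복.py | solution
-- ===== SOURCE A (Python) =====
-- def solution(n, lost, reserve):
--     lost_copy = [x for x in lost if x not in reserve]
--     reserve_copy = [x for x in reserve if x not in lost]
--     lost_copy.sort()
--     reserve_copy.sort()
--
--     answer = n - len(lost_copy)
--     for index in lost_copy:
--         if index in reserve_copy:
--             answer += 1
--             reserve_copy.remove(index)
--
--         elif index - 1 in reserve_copy:
--             answer += 1
--             reserve_copy.remove(index - 1)
--
--         elif index + 1 in reserve_copy:
--             answer += 1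
--             reserve_copy.remove(index + 1)
--
--     return answer
-- ===== SOURCE B (Python) =====
-- def solution(n, lost, reserve):
--     lost_set, reserve_set = set(lost), set(reserve)
--     need, have = {}, {}
--     answer = n
--     for x in lost:
--         if x not in reserve_set:
--             need[x] = need.get(x, 0) + 1
--             answer -= 1
--     for x in reserve:
--         if x not in lost_set:
--             have[x] = have.get(x, 0) + 1
--     prev = None  # (value, is_need, leftover_count) of the previously scanned value
--     for v in sorted(need.keys() | have.keys()):
--         if v in need:
--             cnt = need[v]
--             if prev is not None and prev[0] == v - 1 and not prev[1]:
--                 m = min(cnt, prev[2])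
--                 answer += m
--                 cnt -= m
--             prev = (v, True, cnt)
--         else:
--             cnt = have[v]
--             if prev is not None and prev[0] == v - 1 and prev[1]:
--                 m = min(cnt, prev[2])
--                 answer += m
--                 cnt -= m
--             prev = (v, False, cnt)
--     return answer
-- ===== Notes on version B (the rewrite author's own statement) =====
-- stated objective: faster
-- what changed: Instead of A's element-by-element greedy with repeated membership scans and .remove over the sorted reserve list, B aggregates lost/reserve into per-value count dictionaries and does one carry-state scan over the sorted distinct values, matching whole groups at once with min() arithmetic.
import Mathlib
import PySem

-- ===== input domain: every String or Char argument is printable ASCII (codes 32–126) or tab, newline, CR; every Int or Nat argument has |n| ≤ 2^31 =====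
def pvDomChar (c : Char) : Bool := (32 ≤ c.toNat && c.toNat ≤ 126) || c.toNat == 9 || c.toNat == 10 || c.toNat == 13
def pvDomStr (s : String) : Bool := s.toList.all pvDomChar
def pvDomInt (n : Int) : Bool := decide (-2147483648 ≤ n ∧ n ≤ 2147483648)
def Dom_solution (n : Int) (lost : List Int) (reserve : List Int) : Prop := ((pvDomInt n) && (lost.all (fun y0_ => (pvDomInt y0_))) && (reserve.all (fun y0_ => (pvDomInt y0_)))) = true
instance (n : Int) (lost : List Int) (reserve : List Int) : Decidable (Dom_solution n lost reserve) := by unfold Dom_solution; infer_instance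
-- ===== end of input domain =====

-- B replaces A's element-by-element greedy (membership scans and .remove over the
-- sorted reserve list) by per-value count dictionaries and a single carry-state scan
-- over the sorted distinct values, matching whole groups at once with min().

-- ===== PORT A =====
-- loop body of A's 'for index in lost_copy'; state = (answer, reserve_copy).
-- reserve_copy.remove(v) is guarded by 'v in reserve_copy', so remove? is some; getD is unreachable fallback
def solutionLoopA (state : Int × List Int) (index : Int) : Int × List Int :=
  if index ∈ state.2 then
    (state.1 + 1, (PySem.List.remove? state.2 index).getD state.2)
  else if index - 1 ∈ state.2 then
    (state.1 + 1, (PySem.List.remove? state.2 (index - 1)).getD state.2)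
  else if index + 1 ∈ state.2 then
    (state.1 + 1, (PySem.List.remove? state.2 (index + 1)).getD state.2)
  else state

def solution (n : Int) (lost : List Int) (reserve : List Int) : Int :=
  let lostCopy := lost.filter (fun x => decide (x ∉ reserve))
  let reserveCopy := reserve.filter (fun x => decide (x ∉ lost))
  let lostCopyS := PySem.List.sorted lostCopy (fun x => x) false
  let reserveCopyS := PySem.List.sorted reserveCopy (fun x => x) false
  (lostCopyS.foldl solutionLoopA (n - (lostCopyS.length : Int), reserveCopyS)).1

-- ===== PORT B =====
-- loop body of B's 'for v in sorted(need.keys() | have.keys())'; state = (answer, prev).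
-- prev = None | (value, is_need, leftover).  'need[v]' / 'have[v]' are ported with getD:
-- the key is guaranteed present in the branch where each is read (v comes from the key union).
def solutionLoopB (need haveD : PySem.Dict Int Int) (s : Int × Option (Int × Bool × Int)) (v : Int) :
    Int × Option (Int × Bool × Int) :=
  if need.contains v then
    let cnt := need.getD v 0
    match s.2 with
    | some (u, false, h) =>
        if u = v - 1 then (s.1 + min cnt h, some (v, true, cnt - min cnt h))
        else (s.1, some (v, true, cnt))
    | _ => (s.1, some (v, true, cnt))
  else
    let cnt := haveD.getD v 0
    match s.2 with
    | some (u, true, l) =>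
        if u = v - 1 then (s.1 + min cnt l, some (v, false, cnt - min cnt l))
        else (s.1, some (v, false, cnt))
    | _ => (s.1, some (v, false, cnt))

-- the 'need.keys() | have.keys()' set union, ported as dedup of the concatenation
-- (sorted() then canonicalises the iteration order, so the result is exact)
def solution_alt (n : Int) (lost : List Int) (reserve : List Int) : Int :=
  let lostSet : PySem.Set Int := PySem.Set.ofList lost
  let reserveSet : PySem.Set Int := PySem.Set.ofList reserve
  let s1 := lost.foldl
    (fun (s : PySem.Dict Int Int × Int) x =>
      if x ∉ reserveSet then (s.1.insert x (s.1.getD x 0 + 1), s.2 - 1) else s)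
    (PySem.Dict.empty, n)
  let need := s1.1
  let haveD := reserve.foldl
    (fun (d : PySem.Dict Int Int) x =>
      if x ∉ lostSet then d.insert x (d.getD x 0 + 1) else d)
    PySem.Dict.empty
  let vals := PySem.List.sorted
    ((PySem.Set.ofList (need.keys ++ haveD.keys) : PySem.Set Int) : List Int) (fun x => x) false
  (vals.foldl (solutionLoopB need haveD) (s1.2, none)).1

-- ===== PRECONDITION & SPEC =====
def Spec_solution (n : Int) (lost : List Int) (reserve : List Int) (out : Int) : Prop := out = solution_alt n lost reserve
instance (n : Int) (lost : List Int) (reserve : List Int) (out : Int) : Decidable (Spec_solution n lost reserve out) := by unfold Spec_solution; infer_instance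

-- ===== CLAIM (what is proved, stated in full; the proofs are below) =====
def Claim_equal_solution : Prop := ∀ (n : Int) (lost : List Int) (reserve : List Int), Dom_solution n lost reserve → Spec_solution n lost reserve (solution n lost reserve)

-- ===== LEMMAS AND PROOFS =====

-- abstract version of A's loop over the reserve MULTISET as a count function
def stepC (s : Int × (Int → Int)) (i : Int) : Int × (Int → Int) :=
  if 0 < s.2 (i - 1) then (s.1 + 1, fun w => if w = i - 1 then s.2 w - 1 else s.2 w)
  else if 0 < s.2 (i + 1) then (s.1 + 1, fun w => if w = i + 1 then s.2 w - 1 else s.2 w)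
  else s

-- abstract version of B's loop over count FUNCTIONS
def stepS (ncnt hcnt : Int → Int) (s : Int × Option (Int × Bool × Int)) (v : Int) :
    Int × Option (Int × Bool × Int) :=
  if 0 < ncnt v then
    let cnt := ncnt v
    match s.2 with
    | some (u, false, h) =>
        if u = v - 1 then (s.1 + min cnt h, some (v, true, cnt - min cnt h))
        else (s.1, some (v, true, cnt))
    | _ => (s.1, some (v, true, cnt))
  else
    let cnt := hcnt v
    match s.2 with
    | some (u, true, l) =>
        if u = v - 1 then (s.1 + min cnt l, some (v, false, cnt - min cnt l))
        else (s.1, some (v, false, cnt))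
    | _ => (s.1, some (v, false, cnt))

-- invariant linking the two abstract scans between value groups
def InvP (hcnt : Int → Int) (prev : Option (Int × Bool × Int)) (c : Int → Int)
    (ansA ansB : Int) : Prop :=
  match prev with
  | none => ansA = ansB ∧ ∀ w, c w = hcnt w
  | some (u, true, l) =>
      0 ≤ l ∧ ansA = ansB + min l (hcnt (u + 1)) ∧
      ∀ w, u ≤ w → c w = if w = u + 1 then hcnt (u + 1) - min l (hcnt (u + 1))
                         else if w = u then 0 else hcnt w
  | some (u, false, h) =>
      ansA = ansB ∧ 0 ≤ h ∧ ∀ w, u ≤ w → c w = if w = u then h else hcnt w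

-- (L1) A's loop over the concrete sorted list equals the count-function loop
lemma loopA_eq_stepC (L : List Int) :
    ∀ (ans : Int) (rc : List Int) (c : Int → Int),
      (∀ i ∈ L, i ∉ rc) → (∀ v, c v = (rc.count v : Int)) →
      (L.foldl solutionLoopA (ans, rc)).1 = (L.foldl stepC (ans, c)).1 := by
  induction L with
  | nil => intros; rfl
  | cons idx rest ih =>
    intro ans rc c hdis hcnt
    have hidx : idx ∉ rc := hdis idx (by simp)
    have hrest : ∀ i ∈ rest, i ∉ rc := fun i hi => hdis i (by simp [hi])
    have hmemiff : ∀ v, v ∈ rc ↔ 0 < c v := by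
      intro v
      rw [hcnt v]
      exact_mod_cast (List.count_pos_iff (l := rc) (a := v)).symm
    simp only [List.foldl_cons]
    by_cases c1 : 0 < c (idx - 1)
    · have hmem : idx - 1 ∈ rc := (hmemiff _).mpr c1
      have hrem := PySem.List.remove?_eq_some_erase (v := idx - 1) (xs := rc) hmem
      rw [show solutionLoopA (ans, rc) idx = (ans + 1, rc.erase (idx - 1)) by
            simp [solutionLoopA, hidx, hmem, hrem],
          show stepC (ans, c) idx = (ans + 1, fun w => if w = idx - 1 then c w - 1 else c w) by
            simp [stepC, c1]]
      apply ih
      · exact fun i hi h => hrest i hi (List.mem_of_mem_erase h)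
      · intro v
        by_cases hveq : v = idx - 1
        · have hcpos : 1 ≤ rc.count (idx - 1) := List.count_pos_iff.mpr hmem
          rw [hveq, if_pos rfl, List.count_erase_self, Nat.cast_sub hcpos, hcnt (idx - 1)]
          simp
        · rw [List.count_erase_of_ne hveq, if_neg hveq]
          exact hcnt v
    · by_cases c2 : 0 < c (idx + 1)
      · have hmem : idx + 1 ∈ rc := (hmemiff _).mpr c2
        have hnm1 : idx - 1 ∉ rc := fun h => c1 ((hmemiff _).mp h)
        have hrem := PySem.List.remove?_eq_some_erase (v := idx + 1) (xs := rc) hmem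
        rw [show solutionLoopA (ans, rc) idx = (ans + 1, rc.erase (idx + 1)) by
              simp [solutionLoopA, hidx, hnm1, hmem, hrem],
            show stepC (ans, c) idx = (ans + 1, fun w => if w = idx + 1 then c w - 1 else c w) by
              simp [stepC, c1, c2]]
        apply ih
        · exact fun i hi h => hrest i hi (List.mem_of_mem_erase h)
        · intro v
          by_cases hveq : v = idx + 1
          · have hcpos : 1 ≤ rc.count (idx + 1) := List.count_pos_iff.mpr hmem
            rw [hveq, if_pos rfl, List.count_erase_self, Nat.cast_sub hcpos, hcnt (idx + 1)]
            simp
          · rw [List.count_erase_of_ne hveq, if_neg hveq]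
            exact hcnt v
      · have hnm1 : idx - 1 ∉ rc := fun h => c1 ((hmemiff _).mp h)
        have hnp1 : idx + 1 ∉ rc := fun h => c2 ((hmemiff _).mp h)
        rw [show solutionLoopA (ans, rc) idx = (ans, rc) by
              simp [solutionLoopA, hidx, hnm1, hnp1],
            show stepC (ans, c) idx = (ans, c) by
              simp [stepC, c1, c2]]
        exact ih ans rc c hrest hcnt

-- (L2) one whole group of k equal lost values, batched
lemma stepC_replicate (k : Nat) :
    ∀ (ans : Int) (c : Int → Int) (v : Int), 0 ≤ c (v - 1) → 0 ≤ c (v + 1) →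
      (List.replicate k v).foldl stepC (ans, c) =
        (ans + min (k : Int) (c (v - 1)) + min ((k : Int) - min (k : Int) (c (v - 1))) (c (v + 1)),
         fun w => if w = v - 1 then c (v - 1) - min (k : Int) (c (v - 1))
                  else if w = v + 1 then c (v + 1) - min ((k : Int) - min (k : Int) (c (v - 1))) (c (v + 1))
                  else c w) := by
  induction k with
  | zero =>
    intro ans c v ha hb
    simp only [List.replicate, List.foldl_nil, Nat.cast_zero]
    refine Prod.ext ?_ ?_
    · simp only []
      omega
    · funext w
      simp only []
      split_ifs with h1 h2
      · rw [h1]; omega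
      · rw [h2]; omega
      · rfl
  | succ k ih =>
    intro ans c v ha hb
    have hne : v + 1 ≠ v - 1 := by omega
    have hne' : v - 1 ≠ v + 1 := by omega
    rw [List.replicate_succ, List.foldl_cons]
    by_cases h1 : 0 < c (v - 1)
    · have hstep : stepC (ans, c) v = (ans + 1, fun w => if w = v - 1 then c w - 1 else c w) := by
        simp [stepC, h1]
      rw [hstep,
          ih (ans + 1) (fun w => if w = v - 1 then c w - 1 else c w) v
            (by simp only [if_pos rfl]; omega) (by simp only [if_neg hne]; exact hb)]
      refine Prod.ext ?_ ?_
      · simp only [if_pos rfl, if_neg hne]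
        push_cast
        omega
      · funext w
        by_cases hw1 : w = v - 1
        · simp only [hw1, if_pos rfl, if_neg hne]
          push_cast
          omega
        · by_cases hw2 : w = v + 1
          · simp only [hw1, hw2, if_pos rfl, if_neg hne, if_neg hne', if_false]
            push_cast
            omega
          · simp only [hw1, hw2, if_false]
    · have ha0 : c (v - 1) = 0 := by omega
      by_cases h2 : 0 < c (v + 1)
      · have hstep : stepC (ans, c) v = (ans + 1, fun w => if w = v + 1 then c w - 1 else c w) := by
          simp [stepC, h1, h2]
        rw [hstep,
            ih (ans + 1) (fun w => if w = v + 1 then c w - 1 else c w) v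
              (by simp only [if_neg hne']; exact ha) (by simp only [if_pos rfl]; omega)]
        refine Prod.ext ?_ ?_
        · simp only [if_pos rfl, if_neg hne']
          push_cast
          omega
        · funext w
          by_cases hw1 : w = v - 1
          · simp only [hw1, if_pos rfl, if_neg hne']
            push_cast
            omega
          · by_cases hw2 : w = v + 1
            · simp only [hw1, hw2, if_pos rfl, if_neg hne, if_neg hne', if_false]
              push_cast
              omega
            · simp only [hw1, hw2, if_false]
      · have hb0 : c (v + 1) = 0 := by omega
        have hstep : stepC (ans, c) v = (ans, c) := by
          simp [stepC, h1, h2]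
        rw [hstep, ih ans c v ha hb]
        refine Prod.ext ?_ ?_
        · simp only []
          omega
        · funext w
          simp only []
          split_ifs with hw1 hw2 <;> omega

-- groups of equal values at the front of a sorted bounded-below list
lemma sorted_group_prefix (v : Int) :
    ∀ (L : List Int), L.Pairwise (· ≤ ·) → (∀ x ∈ L, v ≤ x) →
      L = List.replicate (L.count v) v ++ L.filter (fun x => decide (x ≠ v)) := by
  intro L
  induction L with
  | nil => intros; simp
  | cons x t ih =>
    intro hp hall
    have hx := (List.pairwise_cons.mp hp).1
    have ht := (List.pairwise_cons.mp hp).2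
    by_cases hxv : x = v
    · subst hxv
      have htail := ih ht (fun y hy => hall y (List.mem_cons_of_mem _ hy))
      simp only [List.count_cons_self, List.replicate_succ, List.cons_append]
      rw [List.filter_cons_of_neg (by simp)]
      exact congrArg (x :: ·) htail
    · have hvx : v < x := lt_of_le_of_ne (hall x List.mem_cons_self) (fun h => hxv h.symm)
      have hvnot : v ∉ x :: t := by
        intro h
        rcases List.mem_cons.mp h with h | h
        · exact hxv h.symm
        · exact absurd (hx v h) (by omega)
      rw [List.count_eq_zero.mpr hvnot, List.replicate, List.nil_append,
          List.filter_eq_self.mpr ?_]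
      intro a ha
      rcases List.mem_cons.mp ha with h | h
      · simp [h]; omega
      · have := hx a h
        simp; omega

-- (L3) a sorted list is the concatenation of its per-value groups
lemma sorted_eq_flatMap_replicate :
    ∀ (V L : List Int), V.Pairwise (· < ·) → L.Pairwise (· ≤ ·) → (∀ x ∈ L, x ∈ V) →
      L = V.flatMap (fun v => List.replicate (L.count v) v) := by
  intro V
  induction V with
  | nil =>
    intro L _ _ hmem
    have : L = [] := List.eq_nil_iff_forall_not_mem.mpr (fun x hx => by simpa using hmem x hx)
    simp [this]
  | cons v V' ihV =>
    intro L hVp hLp hmem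
    have hv := (List.pairwise_cons.mp hVp).1
    have hV' := (List.pairwise_cons.mp hVp).2
    have hall : ∀ x ∈ L, v ≤ x := by
      intro x hx
      rcases List.mem_cons.mp (hmem x hx) with h | h
      · omega
      · exact le_of_lt (hv x h)
    have hL := sorted_group_prefix v L hLp hall
    rw [List.flatMap_cons]
    have hL' : L.filter (fun x => decide (x ≠ v))
        = V'.flatMap (fun w => List.replicate ((L.filter (fun x => decide (x ≠ v))).count w) w) := by
      apply ihV
      · exact hV'
      · exact hLp.filter _
      · intro x hx
        have hxL := List.mem_of_mem_filter hx
        have hxv : x ≠ v := by simpa using List.of_mem_filter hx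
        rcases List.mem_cons.mp (hmem x hxL) with h | h
        · exact absurd h hxv
        · exact h
    have hcnt : ∀ w ∈ V', (L.filter (fun x => decide (x ≠ v))).count w = L.count w := by
      intro w hw
      have hwv : w ≠ v := by have := hv w hw; omega
      rw [List.count_filter]
      simp [hwv]
    have hflat : V'.flatMap (fun w => List.replicate ((L.filter (fun x => decide (x ≠ v))).count w) w)
        = V'.flatMap (fun w => List.replicate (L.count w) w) := by
      apply List.flatMap_congr
      intro w hw
      rw [hcnt w hw]
    calc L = List.replicate (L.count v) v ++ L.filter (fun x => decide (x ≠ v)) := hL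
      _ = List.replicate (L.count v) v ++ V'.flatMap (fun w => List.replicate (L.count w) w) := by
            rw [← hflat, ← hL']

-- (L4) the main scan equivalence: group-batched stepC = carry-state stepS
lemma scan_eq (ncnt hcnt : Int → Int)
    (hn0 : ∀ v, 0 ≤ ncnt v) (hh0 : ∀ v, 0 ≤ hcnt v)
    (hdisj : ∀ v, 0 < ncnt v → hcnt v = 0) :
    ∀ (V : List Int) (ansB : Int) (prev : Option (Int × Bool × Int)) (c : Int → Int) (ansA : Int),
      V.Pairwise (· < ·) →
      (∀ w, (0 < ncnt w ∨ 0 < hcnt w) →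
        (match prev with | none => w ∈ V | some (u, _, _) => u < w → w ∈ V)) →
      (∀ v ∈ V, match prev with | none => True | some (u, _, _) => u < v) →
      InvP hcnt prev c ansA ansB →
      ((V.flatMap (fun v => List.replicate (ncnt v).toNat v)).foldl stepC (ansA, c)).1
        = (V.foldl (stepS ncnt hcnt) (ansB, prev)).1 := by
  intro V
  induction V with
  | nil =>
    intro ansB prev c ansA _ hcov _ hinv
    simp only [List.flatMap_nil, List.foldl_nil]
    rcases prev with _ | ⟨u, kind, q⟩
    · exact hinv.1
    · rcases kind with _ | _
      · exact hinv.1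
      · -- prev need: pending offset min q (hcnt (u+1)) must be 0, as hcnt (u+1) = 0
        have h0 : hcnt (u + 1) = 0 := by
          by_contra h
          have hpos : 0 < hcnt (u + 1) := lt_of_le_of_ne (hh0 _) (Ne.symm h)
          exact absurd (hcov (u + 1) (Or.inr hpos) (by omega)) (by simp)
        have h1 := hinv.2.1
        have hq := hinv.1
        rw [h0] at h1
        omega
  | cons v V' ih =>
    intro ansB prev c ansA hVp hcov hlt hinv
    have hvlt := (List.pairwise_cons.mp hVp).1
    have hV'p := (List.pairwise_cons.mp hVp).2
    rw [List.flatMap_cons, List.foldl_append, List.foldl_cons]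
    have hk : (((ncnt v).toNat : Nat) : Int) = ncnt v := Int.toNat_of_nonneg (hn0 v)
    rcases prev with _ | ⟨u, kind, q⟩
    · -- prev = none : c = hcnt everywhere
      obtain ⟨hAB, hc⟩ := hinv
      have hgap : ∀ w, w < v → ncnt w ≤ 0 ∧ hcnt w ≤ 0 := by
        intro w hw
        constructor <;> by_contra h
        · rcases List.mem_cons.mp (hcov w (Or.inl (by omega))) with h' | h'
          · omega
          · exact absurd (hvlt w h') (by omega)
        · rcases List.mem_cons.mp (hcov w (Or.inr (by omega))) with h' | h'
          · omega
          · exact absurd (hvlt w h') (by omega)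
      have hcov' : ∀ w, (0 < ncnt w ∨ 0 < hcnt w) → v < w → w ∈ V' := by
        intro w hpos hvw
        rcases List.mem_cons.mp (hcov w hpos) with h' | h'
        · omega
        · exact h'
      have hchigh : ∀ w, v ≤ w → c w = hcnt w := fun w _ => hc w
      by_cases hneed : 0 < ncnt v
      · have hcv : hcnt v = 0 := hdisj v hneed
        have ha : c (v - 1) = 0 := by
          rw [hc]
          have h1 := (hgap (v - 1) (by omega)).2
          have h2 := hh0 (v - 1)
          omega
        rw [stepC_replicate _ ansA c v (by rw [ha]) (by rw [hc]; exact hh0 _)]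
        have hB : stepS ncnt hcnt (ansB, none) v = (ansB, some (v, true, ncnt v)) := by
          simp [stepS, hneed]
        rw [hB]
        apply ih _ _ _ _ hV'p (fun w hpos => hcov' w hpos) (fun t ht => hvlt t ht)
        simp only [InvP]
        refine ⟨by have := hn0 v; omega, ?_, ?_⟩
        · rw [hk, ha, hchigh (v + 1) (by omega)]
          omega
        · intro w hw
          rw [if_neg (show ¬ w = v - 1 by omega)]
          by_cases h1 : w = v + 1
          · rw [if_pos h1, if_pos h1, hk, ha, hchigh (v + 1) (by omega)]
            omega
          · rw [if_neg h1, if_neg h1]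
            by_cases h2 : w = v
            · rw [if_pos h2, h2, hchigh v le_rfl]
              omega
            · rw [if_neg h2, hchigh w hw]
      · -- have-value v : A's batch is empty; B records (v, false, hcnt v)
        have hn : (ncnt v).toNat = 0 := by have := hn0 v; omega
        rw [hn]
        simp only [List.replicate, List.foldl_nil]
        have hB : stepS ncnt hcnt (ansB, none) v = (ansB, some (v, false, hcnt v)) := by
          simp [stepS, hneed]
        rw [hB]
        apply ih _ _ _ _ hV'p (fun w hpos => hcov' w hpos) (fun t ht => hvlt t ht)
        simp only [InvP]
        refine ⟨hAB, hh0 v, ?_⟩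
        intro w hw
        rw [hc]
        by_cases h1 : w = v
        · rw [if_pos h1, h1]
        · rw [if_neg h1]
    · -- prev = some (u, kind, q)
      have huv : u < v := hlt v List.mem_cons_self
      have hgap : ∀ w, u < w → w < v → ncnt w ≤ 0 ∧ hcnt w ≤ 0 := by
        intro w hw1 hw2
        constructor <;> by_contra h
        · rcases List.mem_cons.mp (hcov w (Or.inl (by omega)) hw1) with h' | h'
          · omega
          · exact absurd (hvlt w h') (by omega)
        · rcases List.mem_cons.mp (hcov w (Or.inr (by omega)) hw1) with h' | h'
          · omega
          · exact absurd (hvlt w h') (by omega)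
      have hcov' : ∀ w, (0 < ncnt w ∨ 0 < hcnt w) → v < w → w ∈ V' := by
        intro w hpos hvw
        rcases List.mem_cons.mp (hcov w hpos (by omega)) with h' | h'
        · omega
        · exact h'
      rcases kind with _ | _
      · -- prev = some (u, false, q) : leftover reserve q at u
        obtain ⟨hAB, hq0, hcw⟩ := hinv
        have hchigh : ∀ w, v ≤ w → c w = hcnt w := by
          intro w hw
          rw [hcw w (by omega), if_neg (show ¬ w = u by omega)]
        by_cases hneed : 0 < ncnt v
        · have hcv : hcnt v = 0 := hdisj v hneed
          by_cases hu : u = v - 1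
          · -- adjacent leftover reserve: both sides match min (ncnt v) q
            have ha : c (v - 1) = q := by
              rw [hcw (v - 1) (by omega), if_pos hu.symm]
            rw [stepC_replicate _ ansA c v (by rw [ha]; exact hq0)
                (by rw [hchigh (v + 1) (by omega)]; exact hh0 _)]
            have hB : stepS ncnt hcnt (ansB, some (u, false, q)) v
                = (ansB + min (ncnt v) q, some (v, true, ncnt v - min (ncnt v) q)) := by
              simp [stepS, hneed, hu]
            rw [hB]
            apply ih _ _ _ _ hV'p (fun w hpos => hcov' w hpos) (fun t ht => hvlt t ht)
            simp only [InvP]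
            refine ⟨by have := hn0 v; have := hq0; omega, ?_, ?_⟩
            · rw [hk, ha, hchigh (v + 1) (by omega)]
              omega
            · intro w hw
              rw [if_neg (show ¬ w = v - 1 by omega)]
              by_cases h1 : w = v + 1
              · rw [if_pos h1, if_pos h1, hk, ha, hchigh (v + 1) (by omega)]
              · rw [if_neg h1, if_neg h1]
                by_cases h2 : w = v
                · rw [if_pos h2, h2, hchigh v le_rfl]
                  omega
                · rw [if_neg h2, hchigh w hw]
          · -- non-adjacent: the stale reserve leftover is invisible
            have ha : c (v - 1) = 0 := by
              rw [hcw (v - 1) (by omega), if_neg (fun h => hu h.symm)]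
              have h1 := (hgap (v - 1) (by omega) (by omega)).2
              have h2 := hh0 (v - 1)
              omega
            rw [stepC_replicate _ ansA c v (by rw [ha])
                (by rw [hchigh (v + 1) (by omega)]; exact hh0 _)]
            have hB : stepS ncnt hcnt (ansB, some (u, false, q)) v
                = (ansB, some (v, true, ncnt v)) := by
              simp [stepS, hneed, hu]
            rw [hB]
            apply ih _ _ _ _ hV'p (fun w hpos => hcov' w hpos) (fun t ht => hvlt t ht)
            simp only [InvP]
            refine ⟨by have := hn0 v; omega, ?_, ?_⟩
            · rw [hk, ha, hchigh (v + 1) (by omega)]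
              omega
            · intro w hw
              rw [if_neg (show ¬ w = v - 1 by omega)]
              by_cases h1 : w = v + 1
              · rw [if_pos h1, if_pos h1, hk, ha, hchigh (v + 1) (by omega)]
                omega
              · rw [if_neg h1, if_neg h1]
                by_cases h2 : w = v
                · rw [if_pos h2, h2, hchigh v le_rfl]
                  omega
                · rw [if_neg h2, hchigh w hw]
        · -- have value after have value: no match in either world
          have hn : (ncnt v).toNat = 0 := by have := hn0 v; omega
          rw [hn]
          simp only [List.replicate, List.foldl_nil]
          have hB : stepS ncnt hcnt (ansB, some (u, false, q)) v
              = (ansB, some (v, false, hcnt v)) := by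
            simp [stepS, hneed]
          rw [hB]
          apply ih _ _ _ _ hV'p (fun w hpos => hcov' w hpos) (fun t ht => hvlt t ht)
          simp only [InvP]
          refine ⟨hAB, hh0 v, ?_⟩
          intro w hw
          rw [hcw w (by omega), if_neg (show ¬ w = u by omega)]
          by_cases h1 : w = v
          · rw [if_pos h1, h1]
          · rw [if_neg h1]
      · -- prev = some (u, true, q) : pending unmatched need q at u
        obtain ⟨hq0, hAB, hcw⟩ := hinv
        by_cases hneed : 0 < ncnt v
        · -- need after need: the pending need is dead, its offset was 0
          have hcv : hcnt v = 0 := hdisj v hneed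
          have hoff0 : hcnt (u + 1) = 0 := by
            by_cases h : u + 1 = v
            · rw [h]; exact hcv
            · have h1 := (hgap (u + 1) (by omega) (by omega)).2
              have h2 := hh0 (u + 1)
              omega
          have hAB' : ansA = ansB := by rw [hoff0] at hAB; omega
          have hchigh : ∀ w, v ≤ w → c w = hcnt w := by
            intro w hw
            rw [hcw w (by omega)]
            by_cases h1 : w = u + 1
            · rw [if_pos h1, h1, hoff0]
              omega
            · rw [if_neg h1, if_neg (show ¬ w = u by omega)]
          have ha : c (v - 1) = 0 := by
            rw [hcw (v - 1) (by omega)]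
            by_cases h1 : v - 1 = u + 1
            · rw [if_pos h1, hoff0]
              omega
            · rw [if_neg h1]
              by_cases h2 : v - 1 = u
              · rw [if_pos h2]
              · rw [if_neg h2]
                have h3 := (hgap (v - 1) (by omega) (by omega)).2
                have h4 := hh0 (v - 1)
                omega
          rw [stepC_replicate _ ansA c v (by rw [ha])
              (by rw [hchigh (v + 1) (by omega)]; exact hh0 _)]
          have hB : stepS ncnt hcnt (ansB, some (u, true, q)) v
              = (ansB, some (v, true, ncnt v)) := by
            simp [stepS, hneed]
          rw [hB]
          apply ih _ _ _ _ hV'p (fun w hpos => hcov' w hpos) (fun t ht => hvlt t ht)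
          simp only [InvP]
          refine ⟨by have := hn0 v; omega, ?_, ?_⟩
          · rw [hk, ha, hchigh (v + 1) (by omega)]
            omega
          · intro w hw
            rw [if_neg (show ¬ w = v - 1 by omega)]
            by_cases h1 : w = v + 1
            · rw [if_pos h1, if_pos h1, hk, ha, hchigh (v + 1) (by omega)]
              omega
            · rw [if_neg h1, if_neg h1]
              by_cases h2 : w = v
              · rw [if_pos h2, h2, hchigh v le_rfl]
                omega
              · rw [if_neg h2, hchigh w hw]
        · -- have value after pending need
          have hn : (ncnt v).toNat = 0 := by have := hn0 v; omega
          rw [hn]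
          simp only [List.replicate, List.foldl_nil]
          by_cases hu : u = v - 1
          · -- adjacent: B now pays the offset min q (hcnt v) that A already took
            have huv1 : u + 1 = v := by omega
            have hB : stepS ncnt hcnt (ansB, some (u, true, q)) v
                = (ansB + min (hcnt v) q, some (v, false, hcnt v - min (hcnt v) q)) := by
              simp [stepS, hneed, hu]
            rw [hB]
            apply ih _ _ _ _ hV'p (fun w hpos => hcov' w hpos) (fun t ht => hvlt t ht)
            simp only [InvP]
            rw [huv1] at hAB
            refine ⟨by omega, by have := hh0 v; omega, ?_⟩
            intro w hw
            rw [hcw w (by omega), huv1]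
            by_cases h1 : w = v
            · rw [if_pos h1, if_pos h1]
              omega
            · rw [if_neg h1, if_neg h1, if_neg (show ¬ w = u by omega)]
          · -- non-adjacent: the pending need dies, its offset was 0
            have hoff0 : hcnt (u + 1) = 0 := by
              have h1 := (hgap (u + 1) (by omega) (by omega)).2
              have h2 := hh0 (u + 1)
              omega
            have hAB' : ansA = ansB := by rw [hoff0] at hAB; omega
            have hB : stepS ncnt hcnt (ansB, some (u, true, q)) v
                = (ansB, some (v, false, hcnt v)) := by
              simp [stepS, hneed, hu]
            rw [hB]
            apply ih _ _ _ _ hV'p (fun w hpos => hcov' w hpos) (fun t ht => hvlt t ht)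
            simp only [InvP]
            refine ⟨hAB', hh0 v, ?_⟩
            intro w hw
            rw [hcw w (by omega)]
            by_cases h1 : w = u + 1
            · omega
            · rw [if_neg h1, if_neg (show ¬ w = u by omega)]
              by_cases h2 : w = v
              · rw [if_pos h2, h2]
              · rw [if_neg h2]

-- glue: B's first loop, split into its counter dict and its running count
lemma foldl_pair_count (p : Int → Prop) [DecidablePred p] :
    ∀ (l : List Int) (d : PySem.Dict Int Int) (a : Int),
      l.foldl (fun (s : PySem.Dict Int Int × Int) x =>
          if p x then (s.1.insert x (s.1.getD x 0 + 1), s.2 - 1) else s) (d, a)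
        = ((l.filter (fun x => decide (p x))).foldl (fun d x => d.insert x (d.getD x 0 + 1)) d,
           a - ((l.filter (fun x => decide (p x))).length : Int)) := by
  intro l
  induction l with
  | nil => intro d a; simp
  | cons x t ih =>
    intro d a
    by_cases hx : p x
    · rw [List.foldl_cons, if_pos hx, ih, List.filter_cons_of_pos (by simpa using hx)]
      refine Prod.ext (by rw [List.foldl_cons]) ?_
      simp only [List.length_cons]
      push_cast
      ring
    · rw [List.foldl_cons, if_neg hx, ih, List.filter_cons_of_neg (by simpa using hx)]

-- ===== VERDICT (by name: the statement is the Claim_ definition above) =====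
theorem solution_spec : Claim_equal_solution := by
  intro n lost reserve _
  unfold Spec_solution
  simp only [solution, solution_alt]
  rw [foldl_pair_count]
  -- normalise the set-membership filters of B to A's list-membership filters
  have hfiltL : lost.filter (fun x => decide (x ∉ (PySem.Set.ofList reserve : PySem.Set Int)))
      = lost.filter (fun x => decide (x ∉ reserve)) :=
    List.filter_congr (fun x _ => decide_eq_decide.mpr (by rw [PySem.Set.mem_ofList]))
  have hfiltR : reserve.filter (fun x => decide (x ∉ (PySem.Set.ofList lost : PySem.Set Int)))
      = reserve.filter (fun x => decide (x ∉ lost)) :=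
    List.filter_congr (fun x _ => decide_eq_decide.mpr (by rw [PySem.Set.mem_ofList]))
  rw [PySem.List.foldl_ite_eq_foldl_filter, hfiltL, hfiltR,
      PySem.Dict.foldl_insert_getD_add_one_eq_counter, PySem.Dict.foldl_insert_getD_add_one_eq_counter]
  -- names
  set LO' := lost.filter (fun x => decide (x ∉ reserve)) with hLO'
  set RO' := reserve.filter (fun x => decide (x ∉ lost)) with hRO'
  set LOs := PySem.List.sorted LO' (fun x => x) false with hLOs
  set RCs := PySem.List.sorted RO' (fun x => x) false with hRCs
  set ncnt : Int → Int := fun v => ((LO'.count v : Nat) : Int) with hncnt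
  set hcnt : Int → Int := fun v => ((RO'.count v : Nat) : Int) with hhcnt
  set V := PySem.List.sorted
      ((PySem.Set.ofList ((PySem.Dict.counter LO').keys ++ (PySem.Dict.counter RO').keys) : PySem.Set Int) : List Int)
      (fun x => x) false with hV
  -- dict bridges
  have hgn : ∀ v, (PySem.Dict.counter LO').getD v 0 = ncnt v := by
    intro v
    simp only [hncnt]
    exact PySem.Dict.getD_counter LO' v
  have hgh : ∀ v, (PySem.Dict.counter RO').getD v 0 = hcnt v := by
    intro v
    simp only [hhcnt]
    exact PySem.Dict.getD_counter RO' v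
  have hmemV : ∀ w : Int, w ∈ V ↔ (w ∈ LO' ∨ w ∈ RO') := by
    intro w
    rw [hV, PySem.List.mem_sorted, PySem.Set.mem_ofList, List.mem_append,
        PySem.Dict.keys_counter, PySem.Dict.keys_counter, PySem.Set.mem_ofList, PySem.Set.mem_ofList]
  have hcb : ∀ v, (PySem.Dict.counter LO').contains v = decide (0 < ncnt v) := by
    intro v
    rw [PySem.Dict.contains_eq_decide_mem_keys, PySem.Dict.keys_counter]
    refine decide_eq_decide.mpr ?_
    rw [PySem.Set.mem_ofList, hncnt]
    simp only []
    rw [← List.count_pos_iff (l := LO') (a := v)]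
    omega
  -- B's loop body equals the abstract carry-state step
  have hstepB : solutionLoopB (PySem.Dict.counter LO') (PySem.Dict.counter RO') = stepS ncnt hcnt := by
    funext s v
    simp only [solutionLoopB, stepS, hcb, hgn, hgh, decide_eq_true_eq]
  rw [hstepB]
  -- A's loop over the concrete list equals the abstract count-function loop
  have hdisjAR : ∀ i ∈ LOs, i ∉ RCs := by
    intro i hi hmem
    have h1 : i ∈ LO' := (PySem.List.mem_sorted _ _ _ _).mp hi
    have h2 : i ∈ RO' := (PySem.List.mem_sorted _ _ _ _).mp hmem
    have h3 := List.of_mem_filter h1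
    have h4 := List.mem_of_mem_filter h2
    simp only [decide_eq_true_eq] at h3
    exact h3 h4
  rw [loopA_eq_stepC LOs _ RCs (fun v => ((RCs.count v : Nat) : Int)) hdisjAR (fun v => rfl)]
  set ansA0 := n - (LOs.length : Int) with hansA0
  -- the sorted lost-only list is its per-value groups over V
  have hVlt : V.Pairwise (· < ·) := by
    rw [hV]
    exact PySem.List.sorted_ofList_pairwise_lt _
  have hflat : LOs = V.flatMap (fun v => List.replicate (ncnt v).toNat v) := by
    have h1 : LOs = V.flatMap (fun v => List.replicate (LOs.count v) v) := by
      apply sorted_eq_flatMap_replicate V LOs hVlt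
      · rw [hLOs]
        exact PySem.List.sorted_pairwise _ _
      · intro x hx
        exact (hmemV x).mpr (Or.inl ((PySem.List.mem_sorted _ _ _ _).mp hx))
    rw [h1]
    apply List.flatMap_congr
    intro v _
    have : LOs.count v = (ncnt v).toNat := by
      rw [hncnt]
      simp only [Int.toNat_natCast]
      rw [hLOs]
      exact (PySem.List.sorted_perm _ _ _).count_eq v
    rw [this]
  rw [hflat]
  -- hand over to the scan equivalence
  apply scan_eq ncnt hcnt
    (fun v => by rw [hncnt]; exact Int.natCast_nonneg _)
    (fun v => by rw [hhcnt]; exact Int.natCast_nonneg _)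
  · -- disjoint supports
    intro v hv
    rw [hhcnt]
    simp only [Int.natCast_eq_zero, List.count_eq_zero]
    intro hmem
    have h1 : v ∈ LO' := by
      rw [hncnt] at hv
      beta_reduce at hv
      exact List.count_pos_iff.mp (by exact_mod_cast hv)
    have h3 := List.of_mem_filter hmem
    simp only [decide_eq_true_eq] at h3
    exact h3 (List.mem_of_mem_filter h1)
  · exact hVlt
  · -- every positive value is scanned
    intro w hw
    simp only []
    refine (hmemV w).mpr ?_
    rcases hw with h | h
    · left
      rw [hncnt] at h
      beta_reduce at h
      exact List.count_pos_iff.mp (by exact_mod_cast h)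
    · right
      rw [hhcnt] at h
      beta_reduce at h
      exact List.count_pos_iff.mp (by exact_mod_cast h)
  · simp
  · -- initial invariant
    simp only [InvP]
    constructor
    · rw [hansA0, hLOs, PySem.List.length_sorted]
    · intro w
      rw [hhcnt, hRCs]
      beta_reduce
      exact_mod_cast congrArg (Nat.cast (R := Int)) ((PySem.List.sorted_perm _ _ _).count_eq w)
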